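-- pv_equiv track=rewrite | github.com/Kamaleshwaran-Valarmathi/Scaler | Advanced DSA/02. Array Techniques/05. Special Index/Solution.py | solve
-- ===== SOURCE A (Python) =====
-- def solve(A):
--     oddPrefSum = [0 for _ in range(len(A))]
--     evenPrefSum = [0 for _ in range(len(A))]
--     for i in range(len(A)):
--         oddPrefSum[i] = (0 if i == 0 else oddPrefSum[i - 1]) + (A[i] if (i & 1) == 0 else 0)
--         evenPrefSum[i] = (0 if i == 0 else evenPrefSum[i - 1]) + (A[i] if (i & 1) == 1 else 0)
--
--     validElementsCount = 0
--     for i in range(len(A)):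
--         curOddSum = (0 if i == 0 else oddPrefSum[i - 1]) + (evenPrefSum[-1] - evenPrefSum[i])
--         curEvenSum = (0 if i == 0 else evenPrefSum[i - 1]) + (oddPrefSum[-1] - oddPrefSum[i])
--         validElementsCount += (1 if curOddSum == curEvenSum else 0)
--     return validElementsCount
-- ===== SOURCE B (Python) =====
-- def solve(A):
--     # Index i is special iff the alternating sum (+A[0] - A[1] + A[2] - ...)
--     # of the elements before i equals the alternating sum of the elements
--     # after i (with signs taken from their original positions).
--     total = 0
--     sign = 1
--     for x in A:
--         total += sign * x
--         sign = -sign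
--     count = 0
--     pref = 0
--     sign = 1
--     for x in A:
--         v = sign * x
--         total -= v  # total is now the alternating sum of the suffix after i
--         if pref == total:
--             count += 1
--         pref += v
--         sign = -sign
--     return count
-- ===== Notes on version B (the rewrite author's own statement) =====
-- stated objective: simpler
-- what changed: B reformulates the problem: index i is special iff the signed alternating sum of elements before i equals that of elements after i, so it keeps one signed running sum (with an in-place shrinking suffix total) instead of A's two parity-partitioned prefix-sum arrays and reconstructed odd/even sums.
import Mathlib
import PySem

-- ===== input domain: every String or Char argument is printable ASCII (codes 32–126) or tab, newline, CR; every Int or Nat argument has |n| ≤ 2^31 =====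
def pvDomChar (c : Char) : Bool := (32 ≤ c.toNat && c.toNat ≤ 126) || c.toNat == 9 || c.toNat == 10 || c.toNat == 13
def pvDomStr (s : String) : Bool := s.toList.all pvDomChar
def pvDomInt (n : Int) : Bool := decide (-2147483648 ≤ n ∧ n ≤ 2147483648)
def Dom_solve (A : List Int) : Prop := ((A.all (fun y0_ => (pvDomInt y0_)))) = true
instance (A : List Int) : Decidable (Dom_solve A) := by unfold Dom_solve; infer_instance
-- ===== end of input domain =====

-- B counts indices where the signed alternating prefix sum equals the alternating suffix sum,
-- using one signed running sum instead of A's two parity-partitioned prefix-sum arrays (simpler).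

-- ===== PORT A =====
def solve (A : List Int) : Int :=
  let n : Int := (A.length : Int)
  let prefs := (PySem.List.pyRange 0 n 1).foldl
    (fun (st : List Int × List Int) i =>
      let a := PySem.List.pyGetD A i 0
      (st.1 ++ [(if i = 0 then 0 else PySem.List.pyGetD st.1 (i-1) 0) +
                (if PySem.Int.band i 1 = 0 then a else 0)],
       st.2 ++ [(if i = 0 then 0 else PySem.List.pyGetD st.2 (i-1) 0) +
                (if PySem.Int.band i 1 = 1 then a else 0)])) ([], [])
  let op := prefs.1
  let ep := prefs.2
  (PySem.List.pyRange 0 n 1).foldl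
    (fun cnt i =>
      let curOdd := (if i = 0 then 0 else PySem.List.pyGetD op (i-1) 0) +
                    (PySem.List.pyGetD ep (-1) 0 - PySem.List.pyGetD ep i 0)
      let curEven := (if i = 0 then 0 else PySem.List.pyGetD ep (i-1) 0) +
                     (PySem.List.pyGetD op (-1) 0 - PySem.List.pyGetD op i 0)
      cnt + (if curOdd = curEven then 1 else 0)) 0

-- ===== PORT B =====
def solve_alt (A : List Int) : Int :=
  let t := A.foldl (fun (st : Int × Int) x => (st.1 + st.2 * x, -st.2)) (0, 1)
  let r := A.foldl
    (fun (st : Int × Int × Int × Int) x =>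
      -- st = (total, count, pref, sign)
      let v := st.2.2.2 * x
      let total := st.1 - v
      let count := st.2.1 + (if st.2.2.1 = total then 1 else 0)
      (total, count, st.2.2.1 + v, -st.2.2.2)) (t.1, 0, 0, 1)
  r.2.1

-- ===== PRECONDITION & SPEC =====
def Spec_solve (A : List Int) (out : Int) : Prop := out = solve_alt A
instance (A : List Int) (out : Int) : Decidable (Spec_solve A out) := by unfold Spec_solve; infer_instance

-- ===== CLAIM (what is proved, stated in full; the proofs are below) =====
def Claim_equal_solve : Prop := ∀ (A : List Int), Dom_solve A → Spec_solve A (solve A)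

-- ===== LEMMAS AND PROOFS =====

def pe (A : List Int) : Nat → Int
  | 0 => 0
  | i+1 => pe A i + (if i % 2 = 0 then A.getD i 0 else 0)

def po (A : List Int) : Nat → Int
  | 0 => 0
  | i+1 => po A i + (if i % 2 = 1 then A.getD i 0 else 0)

def sg (j : Nat) : Int := if j % 2 = 0 then 1 else -1

def altp (A : List Int) : Nat → Int
  | 0 => 0
  | i+1 => altp A i + sg i * A.getD i 0

def altF (s : Int) : List Int → Int
  | [] => 0
  | x :: xs => s * x + altF (-s) xs

theorem band_parity (k : Nat) : PySem.Int.band (k : Int) 1 = ((k % 2 : Nat) : Int) := by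
  rw [PySem.Int.band_one]; exact_mod_cast PySem.Int.mod_natCast k 2

theorem pe_succ_get (A : List Int) (k : Nat) :
    pe A (k+1) = pe A k + (if PySem.Int.band (k : Int) 1 = 0 then PySem.List.pyGetD A (k : Int) 0 else 0) := by
  rw [band_parity]
  rcases Nat.even_or_odd k with he | ho
  · have h2 : k % 2 = 0 := Nat.even_iff.mp he
    simp [pe, h2, PySem.List.pyGetD_natCast]
  · have h2 : k % 2 = 1 := Nat.odd_iff.mp ho
    simp [pe, h2]

theorem po_succ_get (A : List Int) (k : Nat) :
    po A (k+1) = po A k + (if PySem.Int.band (k : Int) 1 = 1 then PySem.List.pyGetD A (k : Int) 0 else 0) := by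
  rw [band_parity]
  rcases Nat.even_or_odd k with he | ho
  · have h2 : k % 2 = 0 := Nat.even_iff.mp he
    simp [po, h2]
  · have h2 : k % 2 = 1 := Nat.odd_iff.mp ho
    simp [po, h2, PySem.List.pyGetD_natCast]

theorem buildA (A : List Int) (k : Nat) (hk : k ≤ A.length) :
    (PySem.List.pyRange 0 (k : Int) 1).foldl
      (fun (st : List Int × List Int) i =>
        let a := PySem.List.pyGetD A i 0
        (st.1 ++ [(if i = 0 then 0 else PySem.List.pyGetD st.1 (i-1) 0) +
                  (if PySem.Int.band i 1 = 0 then a else 0)],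
         st.2 ++ [(if i = 0 then 0 else PySem.List.pyGetD st.2 (i-1) 0) +
                  (if PySem.Int.band i 1 = 1 then a else 0)])) ([], []) =
    ((List.range k).map (fun i => pe A (i+1)), (List.range k).map (fun i => po A (i+1))) := by
  induction k with
  | zero => simp [PySem.List.pyRange_one_eq_nil]
  | succ k ih =>
    have hk' : k ≤ A.length := Nat.le_of_succ_le hk
    have hr : PySem.List.pyRange 0 ((k+1 : Nat) : Int) 1
        = PySem.List.pyRange 0 (k : Int) 1 ++ [(k : Int)] := by
      push_cast
      exact PySem.List.pyRange_one_succ_right (by positivity)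
    rw [hr, List.foldl_append, ih hk']
    simp only [List.foldl_cons, List.foldl_nil, List.range_succ, List.map_append, List.map_cons,
      List.map_nil, Prod.mk.injEq]
    have hoe : (if ((k:Int)) = 0 then (0:Int) else PySem.List.pyGetD ((List.range k).map (fun i => pe A (i+1))) ((k:Int)-1) 0) = pe A k := by
      rcases Nat.eq_zero_or_pos k with h0 | hpos
      · subst h0; simp [pe]
      · have hne : ((k : Int)) ≠ 0 := by exact_mod_cast Nat.pos_iff_ne_zero.mp hpos
        have hcast : ((k : Int) - 1) = ((k - 1 : Nat) : Int) := by omega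
        have hlt : k - 1 < k := by omega
        rw [if_neg hne, hcast, PySem.List.pyGetD_natCast,
          PySem.List.getD_map_range _ k _ 0 hlt]
        congr 1
        omega
    have hee : (if ((k:Int)) = 0 then (0:Int) else PySem.List.pyGetD ((List.range k).map (fun i => po A (i+1))) ((k:Int)-1) 0) = po A k := by
      rcases Nat.eq_zero_or_pos k with h0 | hpos
      · subst h0; simp [po]
      · have hne : ((k : Int)) ≠ 0 := by exact_mod_cast Nat.pos_iff_ne_zero.mp hpos
        have hcast : ((k : Int) - 1) = ((k - 1 : Nat) : Int) := by omega
        have hlt : k - 1 < k := by omega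
        rw [if_neg hne, hcast, PySem.List.pyGetD_natCast,
          PySem.List.getD_map_range _ k _ 0 hlt]
        congr 1
        omega
    rw [hoe, hee, pe_succ_get A k, po_succ_get A k]
    exact ⟨rfl, rfl⟩

def indA (A : List Int) (i : Nat) : Int :=
  if pe A i + (po A A.length - po A (i+1)) = po A i + (pe A A.length - pe A (i+1)) then 1 else 0

theorem countA (A : List Int) :
    (PySem.List.pyRange 0 (A.length : Int) 1).foldl
      (fun cnt i =>
        cnt + (if (if i = 0 then 0 else PySem.List.pyGetD ((List.range A.length).map (fun j => pe A (j+1))) (i-1) 0) +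
                  (PySem.List.pyGetD ((List.range A.length).map (fun j => po A (j+1))) (-1) 0 -
                   PySem.List.pyGetD ((List.range A.length).map (fun j => po A (j+1))) i 0) =
                 (if i = 0 then 0 else PySem.List.pyGetD ((List.range A.length).map (fun j => po A (j+1))) (i-1) 0) +
                  (PySem.List.pyGetD ((List.range A.length).map (fun j => pe A (j+1))) (-1) 0 -
                   PySem.List.pyGetD ((List.range A.length).map (fun j => pe A (j+1))) i 0)
               then 1 else 0)) 0
    = ((List.range A.length).map (fun i => indA A i)).sum := by
  set n := A.length with hn
  rw [PySem.List.foldl_add, PySem.List.pyRange_one, List.map_map]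
  have hcut : (((n : Int)) - 0).toNat = n := by omega
  rw [hcut, zero_add]
  refine congrArg List.sum (List.map_congr_left ?_)
  intro i hi
  have hin : i < n := List.mem_range.mp hi
  have hnpos : 0 < n := Nat.zero_lt_of_lt hin
  simp only [Function.comp_apply, zero_add]
  have hne_o : (List.range n).map (fun j => pe A (j+1)) ≠ [] := by
    simp [List.map_eq_nil_iff, List.range_eq_nil]; omega
  have hne_e : (List.range n).map (fun j => po A (j+1)) ≠ [] := by
    simp [List.map_eq_nil_iff, List.range_eq_nil]; omega
  have hlast_o : PySem.List.pyGetD ((List.range n).map (fun j => pe A (j+1))) (-1) 0 = pe A n := by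
    rw [PySem.List.pyGetD_neg_one _ _ hne_o, List.getLast_eq_getElem]
    simp only [List.length_map, List.length_range, List.getElem_map, List.getElem_range]
    congr 1; omega
  have hlast_e : PySem.List.pyGetD ((List.range n).map (fun j => po A (j+1))) (-1) 0 = po A n := by
    rw [PySem.List.pyGetD_neg_one _ _ hne_e, List.getLast_eq_getElem]
    simp only [List.length_map, List.length_range, List.getElem_map, List.getElem_range]
    congr 1; omega
  have hcur_o : PySem.List.pyGetD ((List.range n).map (fun j => pe A (j+1))) ((i:Int)) 0 = pe A (i+1) := by
    rw [PySem.List.pyGetD_natCast, PySem.List.getD_map_range _ n _ 0 hin]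
  have hcur_e : PySem.List.pyGetD ((List.range n).map (fun j => po A (j+1))) ((i:Int)) 0 = po A (i+1) := by
    rw [PySem.List.pyGetD_natCast, PySem.List.getD_map_range _ n _ 0 hin]
  have hprev_o : (if ((i:Int)) = 0 then (0:Int) else PySem.List.pyGetD ((List.range n).map (fun j => pe A (j+1))) ((i:Int)-1) 0) = pe A i := by
    rcases Nat.eq_zero_or_pos i with h0 | hpos
    · subst h0; simp [pe]
    · have hne : ((i : Int)) ≠ 0 := by exact_mod_cast Nat.pos_iff_ne_zero.mp hpos
      have hcast : ((i : Int) - 1) = ((i - 1 : Nat) : Int) := by omega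
      rw [if_neg hne, hcast, PySem.List.pyGetD_natCast,
        PySem.List.getD_map_range _ n _ 0 (by omega : i - 1 < n)]
      congr 1; omega
  have hprev_e : (if ((i:Int)) = 0 then (0:Int) else PySem.List.pyGetD ((List.range n).map (fun j => po A (j+1))) ((i:Int)-1) 0) = po A i := by
    rcases Nat.eq_zero_or_pos i with h0 | hpos
    · subst h0; simp [po]
    · have hne : ((i : Int)) ≠ 0 := by exact_mod_cast Nat.pos_iff_ne_zero.mp hpos
      have hcast : ((i : Int) - 1) = ((i - 1 : Nat) : Int) := by omega
      rw [if_neg hne, hcast, PySem.List.pyGetD_natCast,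
        PySem.List.getD_map_range _ n _ 0 (by omega : i - 1 < n)]
      congr 1; omega
  rw [hlast_o, hlast_e, hcur_o, hcur_e, hprev_o, hprev_e, indA, hn]

-- B-side: the first fold computes the alternating sum.
theorem foldTot (A : List Int) : ∀ (c s : Int),
    A.foldl (fun (st : Int × Int) x => (st.1 + st.2 * x, -st.2)) (c, s)
    = (c + altF s A, if A.length % 2 = 0 then s else -s) := by
  induction A with
  | nil => intro c s; simp [altF]
  | cons x xs ih =>
    intro c s
    simp only [List.foldl_cons, ih (c + s * x) (-s), altF, List.length_cons]
    rcases Nat.mod_two_eq_zero_or_one xs.length with hp | hp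
    · have : ¬ (xs.length + 1) % 2 = 0 := by omega
      simp [hp, this, add_assoc]
    · have : (xs.length + 1) % 2 = 0 := by omega
      simp [hp, this, add_assoc]

theorem altF_sum (A : List Int) : ∀ (s : Int),
    altF s A = ∑ j ∈ Finset.range A.length, s * sg j * A.getD j 0 := by
  induction A with
  | nil => intro s; simp [altF]
  | cons x xs ih =>
    intro s
    rw [altF, ih (-s), List.length_cons, Finset.sum_range_succ', add_comm]
    congr 1
    · apply Finset.sum_congr rfl
      intro j _
      have hsg : -s * sg j = s * sg (j+1) := by
        unfold sg
        rcases Nat.mod_two_eq_zero_or_one j with hp | hp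
        · have : ¬ (j+1) % 2 = 0 := by omega
          simp [hp, this]
        · have : (j+1) % 2 = 0 := by omega
          simp [hp, this]
      rw [hsg]; rfl
    · simp [sg]

theorem altp_sum (A : List Int) (i : Nat) :
    altp A i = ∑ j ∈ Finset.range i, sg j * A.getD j 0 := by
  induction i with
  | zero => simp [altp]
  | succ i ih => rw [Finset.sum_range_succ, ← ih]; rfl

theorem altF_one (A : List Int) : altF 1 A = altp A A.length := by
  rw [altF_sum, altp_sum]
  apply Finset.sum_congr rfl
  intro j _
  rw [one_mul]

def indC (A : List Int) (i : Nat) : Int :=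
  if altp A i = altp A A.length - altp A (i+1) then 1 else 0

theorem sg_succ (k : Nat) : sg (k+1) = -sg k := by
  unfold sg
  rcases Nat.mod_two_eq_zero_or_one k with hp | hp
  · have : ¬ (k+1) % 2 = 0 := by omega
    simp [hp, this]
  · have : (k+1) % 2 = 0 := by omega
    simp [hp, this]

theorem cntC (A : List Int) : ∀ (m k : Nat) (c : Int), k + m = A.length →
    (A.drop k).foldl
      (fun (st : Int × Int × Int × Int) x =>
        (st.1 - st.2.2.2 * x,
         st.2.1 + (if st.2.2.1 = st.1 - st.2.2.2 * x then 1 else 0),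
         st.2.2.1 + st.2.2.2 * x, -st.2.2.2))
      (altp A A.length - altp A k, c, altp A k, sg k)
    = (altp A A.length - altp A A.length,
       c + ((List.range m).map (fun i => indC A (k+i))).sum,
       altp A A.length, sg A.length) := by
  intro m
  induction m with
  | zero =>
    intro k c hk
    have hk' : k = A.length := by omega
    subst hk'
    simp [List.drop_length]
  | succ m ih =>
    intro k c hk
    have hklt : k < A.length := by omega
    rw [List.drop_eq_getElem_cons hklt]
    have hgd : A[k] = A.getD k 0 := (List.getD_eq_getElem A 0 hklt).symm
    have hsum : ((List.range (m+1)).map (fun i => indC A (k+i))).sum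
        = indC A k + ((List.range m).map (fun i => indC A ((k+1)+i))).sum := by
      rw [List.range_succ_eq_map, List.map_cons, List.map_map, List.sum_cons]
      refine congrArg₂ (· + ·) (congrArg (indC A) (by omega)) (congrArg List.sum ?_)
      apply List.map_congr_left
      intro j _
      simp only [Function.comp_apply]
      exact congrArg (indC A) (by omega)
    simp only [List.foldl_cons]
    have hstep : ((altp A A.length - altp A k - sg k * A[k],
          c + (if altp A k = altp A A.length - altp A k - sg k * A[k] then (1:Int) else 0),
          altp A k + sg k * A[k], -sg k) : Int × Int × Int × Int)
        = (altp A A.length - altp A (k+1), c + indC A k, altp A (k+1), sg (k+1)) := by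
      rw [hgd, sg_succ]
      have haltp : altp A (k+1) = altp A k + sg k * A.getD k 0 := rfl
      rw [haltp, indC, haltp]
      refine Prod.ext (by ring) (Prod.ext ?_ (Prod.ext rfl rfl))
      apply congrArg (c + ·)
      apply if_congr _ rfl rfl
      constructor <;> intro h <;> omega
    rw [hstep, hsum, ← add_assoc]
    exact ih (k+1) (c + indC A k) (by omega)

theorem altp_pe_po (A : List Int) (i : Nat) : altp A i = pe A i - po A i := by
  induction i with
  | zero => simp [altp, pe, po]
  | succ i ih =>
    have haltp : altp A (i+1) = altp A i + sg i * A.getD i 0 := rfl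
    rw [haltp, ih, pe, po]
    unfold sg
    rcases Nat.mod_two_eq_zero_or_one i with hp | hp
    · simp [hp]; ring
    · simp [hp]; ring

theorem indAC (A : List Int) (i : Nat) : indA A i = indC A i := by
  unfold indA indC
  apply if_congr _ rfl rfl
  rw [altp_pe_po, altp_pe_po, altp_pe_po]
  constructor <;> intro h <;> omega

theorem solveA_eq (A : List Int) :
    solve A = ((List.range A.length).map (fun i => indA A i)).sum := by
  simp only [solve]
  rw [buildA A A.length le_rfl]
  exact countA A

theorem solveB_eq (A : List Int) :
    solve_alt A = ((List.range A.length).map (fun i => indC A i)).sum := by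
  simp only [solve_alt]
  rw [foldTot A 0 1]
  have h0 : ((0:Int) + altF 1 A, (0:Int), (0:Int), (1:Int))
      = (altp A A.length - altp A 0, (0:Int), altp A 0, sg 0) := by
    rw [altF_one]
    simp [altp, sg]
  rw [h0]
  have h := cntC A A.length 0 0 (by omega)
  simp only [List.drop_zero] at h
  rw [h]
  simp

-- ===== VERDICT (by name: the statement is the Claim_ definition above) =====
theorem solve_spec : Claim_equal_solve := by
  intro A _
  unfold Spec_solve
  rw [solveA_eq, solveB_eq]
  refine congrArg List.sum (List.map_congr_left ?_)
  intro i _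
  exact indAC A i
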